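-- pv_equiv track=rewrite | github.com/openpsi-project/ReaLHF | realhf/system/buffer.py | _extract_intervals
-- ===== SOURCE A (Python) =====
-- def _extract_intervals(arr):
--     if len(arr) == 0:
--         return []
--
--     # Initialize the list to hold the intervals
--     intervals = []
--
--     # Start of the first interval
--     start = arr[0]
--
--     for i in range(1, len(arr)):
--         # Check if the current element is not contiguous with the previous one
--         if arr[i] != arr[i - 1] + 1:
--             # End of the current interval
--             end = arr[i - 1]
--             # Add the interval as a tuple
--             intervals.append((start, end + 1))
--             # Start a new interval
--             start = arr[i]
--
--     # Add the last interval
--     intervals.append((start, arr[-1] + 1))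
--
--     return intervals
-- ===== SOURCE B (Python) =====
-- def _extract_intervals(arr):
--     rev = []  # intervals in reverse order; most recently started run at the end
--     for x in reversed(arr):
--         if rev and rev[-1][0] == x + 1:
--             rev[-1] = (x, rev[-1][1])
--         else:
--             rev.append((x, x + 1))
--     rev.reverse()
--     return rev
-- ===== Notes on version B (the rewrite author's own statement) =====
-- stated objective: alternative
-- what changed: B scans the list right-to-left and grows/merges the interval at the tail of a reversed result list (reversing once at the end), with no start/prev break-detection variables and no index arithmetic, instead of A's left-to-right index loop that detects breaks and appends closed intervals.
import Mathlib
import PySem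

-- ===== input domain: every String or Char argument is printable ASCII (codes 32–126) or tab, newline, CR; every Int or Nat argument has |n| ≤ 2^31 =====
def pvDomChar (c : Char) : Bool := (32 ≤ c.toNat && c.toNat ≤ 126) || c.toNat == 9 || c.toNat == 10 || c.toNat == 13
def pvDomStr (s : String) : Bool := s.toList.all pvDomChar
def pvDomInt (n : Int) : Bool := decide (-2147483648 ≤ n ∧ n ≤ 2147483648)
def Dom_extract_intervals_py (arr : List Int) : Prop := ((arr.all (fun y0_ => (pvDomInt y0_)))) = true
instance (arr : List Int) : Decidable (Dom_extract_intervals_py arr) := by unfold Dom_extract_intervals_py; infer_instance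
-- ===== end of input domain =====

-- B replaces A's break-detecting index loop (start/prev variables) by a right-to-left scan that
-- merges each element into the front interval of the result; return values proved equal on Dom.

-- ===== PORT A =====
-- A's for-loop over i in range(1, len(arr)) reads only arr[i] and arr[i-1]; it is transliterated
-- as a structural recursion over the tail carrying the same state (intervals, start) plus prev = arr[i-1].
def extract_intervals_py_go (intervals : List (Int × Int)) (start prev : Int) :
    List Int → List (Int × Int)
  | [] => intervals ++ [(start, prev + 1)]
  | x :: xs =>
    if x ≠ prev + 1 then
      extract_intervals_py_go (intervals ++ [(start, prev + 1)]) x x xs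
    else
      extract_intervals_py_go intervals start x xs

def extract_intervals_py (arr : List Int) : List (Int × Int) :=
  match arr with
  | [] => []
  | a :: rest => extract_intervals_py_go [] a a rest

-- ===== PORT B =====
-- B's loop body: merge x into the interval list. Python keeps `rev` back-to-front and calls
-- rev.reverse() at the end; the port keeps the same list front-first (cons/update at the head,
-- python's rev[-1]), so the final reverse() is the identity and is omitted.
def extract_intervals_py_altStep (rev : List (Int × Int)) (x : Int) : List (Int × Int) :=
  match rev with
  | [] => [(x, x + 1)]
  | (s, e) :: rest =>
    if s = x + 1 then (x, e) :: rest else (x, x + 1) :: (s, e) :: rest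

def extract_intervals_py_alt (arr : List Int) : List (Int × Int) :=
  arr.reverse.foldl extract_intervals_py_altStep []

-- ===== PRECONDITION & SPEC =====
def Spec_extract_intervals_py (arr : List Int) (out : List (Int × Int)) : Prop := out = extract_intervals_py_alt arr
instance (arr : List Int) (out : List (Int × Int)) : Decidable (Spec_extract_intervals_py arr out) := by unfold Spec_extract_intervals_py; infer_instance

-- ===== CLAIM (what is proved, stated in full; the proofs are below) =====
def Claim_equal_extract_intervals_py : Prop := ∀ (arr : List Int), Dom_extract_intervals_py arr → Spec_extract_intervals_py arr (extract_intervals_py arr)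

-- ===== LEMMAS AND PROOFS =====

-- merging one element x (known to be the last element of the pending run started at `start`)
-- into an interval list: the head of B's recursion, abstracted over (start, prev).
def pvAttach (start prev : Int) : List (Int × Int) → List (Int × Int)
  | [] => [(start, prev + 1)]
  | (s, e) :: rest =>
    if s = prev + 1 then (start, e) :: rest else (start, prev + 1) :: (s, e) :: rest

theorem pvAlt_foldr (arr : List Int) :
    extract_intervals_py_alt arr = arr.foldr (fun x acc => extract_intervals_py_altStep acc x) [] := by
  simp [extract_intervals_py_alt, List.foldl_reverse]

theorem pvAlt_cons (x : Int) (xs : List Int) :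
    extract_intervals_py_alt (x :: xs) = pvAttach x x (extract_intervals_py_alt xs) := by
  rw [pvAlt_foldr, List.foldr_cons, ← pvAlt_foldr]
  cases h : extract_intervals_py_alt xs with
  | nil => simp [extract_intervals_py_altStep, pvAttach]
  | cons p rest =>
    cases p with
    | mk s e => simp [extract_intervals_py_altStep, pvAttach]

theorem pvGo_append (acc : List (Int × Int)) (start prev : Int) (xs : List Int) :
    extract_intervals_py_go acc start prev xs = acc ++ extract_intervals_py_go [] start prev xs := by
  induction xs generalizing acc start prev with
  | nil => simp [extract_intervals_py_go]
  | cons x xs ih =>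
    by_cases h : x ≠ prev + 1
    · simp only [extract_intervals_py_go, if_pos h]
      rw [ih, ih ([] ++ [(start, prev + 1)])]
      simp
    · simp only [extract_intervals_py_go, if_neg h]
      exact ih acc start x

theorem pvAttach_attach (start prev x : Int) (l : List (Int × Int)) (h : x = prev + 1) :
    pvAttach start x l = pvAttach start prev (pvAttach x x l) := by
  subst h
  cases l with
  | nil => simp [pvAttach]
  | cons p rest =>
    cases p with
    | mk s e =>
      by_cases hs : s = prev + 1 + 1
      · simp [pvAttach, hs]
      · simp [pvAttach, hs]

theorem pvGo_eq_attach (xs : List Int) (start prev : Int) :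
    extract_intervals_py_go [] start prev xs = pvAttach start prev (extract_intervals_py_alt xs) := by
  induction xs generalizing start prev with
  | nil => simp [extract_intervals_py_go, extract_intervals_py_alt, pvAttach]
  | cons x xs ih =>
    rw [pvAlt_cons]
    by_cases h : x ≠ prev + 1
    · simp only [extract_intervals_py_go, if_pos h]
      rw [pvGo_append, ih]
      cases hl : extract_intervals_py_alt xs with
      | nil => simp [pvAttach, h]
      | cons p rest =>
        cases p with
        | mk s e =>
          by_cases hs : s = x + 1
          · simp [pvAttach, hs, h]
          · simp [pvAttach, hs, h]
    · simp only [extract_intervals_py_go, if_neg h]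
      rw [ih, pvAttach_attach start prev x _ (not_not.mp h)]

-- ===== VERDICT (by name: the statement is the Claim_ definition above) =====
theorem extract_intervals_py_spec : Claim_equal_extract_intervals_py := by
  intro arr _
  unfold Spec_extract_intervals_py
  cases arr with
  | nil => rfl
  | cons a rest =>
    show extract_intervals_py_go [] a a rest = _
    rw [pvGo_eq_attach, pvAlt_cons]
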